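-- pv_equiv track=rewrite | github.com/Hik289/RawGomoku | mctsv4_strategy.py | causes_loss
-- ===== SOURCE A (Python) =====
-- import copy
--
-- def get_legal_moves(board):
--     """获取当前棋盘的所有合法落子位置"""
--     size = len(board)
--     moves = []
--     for x in range(size):
--         for y in range(size):
--             if board[x][y] == '.':
--                 moves.append((x, y))
--     return moves
--
-- def make_move(board, move, player):
--     """模拟在棋盘上执行一步棋"""
--     new_board = copy.deepcopy(board)
--     x, y = move
--     new_board[x][y] = player
--     return new_board
--
-- def check_winner(board, player):
--     """检查某一玩家是否获胜"""
--     size = len(board)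
--     directions = [(1, 0), (0, 1), (1, 1), (1, -1)]
--     for x in range(size):
--         for y in range(size):
--             if board[x][y] == player:
--                 for dx, dy in directions:
--                     count = 1
--                     for step in range(1, 5):
--                         nx, ny = x + step * dx, y + step * dy
--                         if 0 <= nx < size and 0 <= ny < size and board[nx][ny] == player:
--                             count += 1
--                         else:
--                             break
--                     if count >= 5:
--                         return True
--     return False
--
-- def causes_loss(board, player):
--     """检测当前棋盘是否会导致玩家失败"""
--     opponent = 'O' if player == 'X' else 'X'
--     moves = get_legal_moves(board)
--     for move in moves:
--         simulated_board = make_move(board, move, opponent)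
--         if check_winner(simulated_board, opponent):
--             return True  # 对手可以在下一步获胜，避免这个位置
--     return False
-- ===== SOURCE B (Python) =====
-- def causes_loss(board, player):
--     """Single O(size^2) scan: examine every in-bounds 5-window once instead of
--     simulating each legal move with a deepcopy and a full-board win rescan."""
--     opponent = 'O' if player == 'X' else 'X'
--     size = len(board)
--     directions = [(1, 0), (0, 1), (1, 1), (1, -1)]
--
--     def window(x, y, dx, dy):
--         return [board[x + k * dx][y + k * dy] for k in range(5)]
--
--     def in_bounds(x, y, dx, dy):
--         return 0 <= x + 4 * dx < size and 0 <= y + 4 * dy < size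
--
--     has_empty = any(board[x][y] == '.' for x in range(size) for y in range(size))
--     four = any(
--         in_bounds(x, y, dx, dy)
--         and window(x, y, dx, dy).count(opponent) == 4
--         and window(x, y, dx, dy).count('.') == 1
--         for x in range(size) for y in range(size) for dx, dy in directions)
--     five = any(
--         in_bounds(x, y, dx, dy) and window(x, y, dx, dy).count(opponent) == 5
--         for x in range(size) for y in range(size) for dx, dy in directions)
--     return four or (five and has_empty)
-- ===== Notes on version B (the rewrite author's own statement) =====
-- stated objective: faster
-- what changed: Instead of simulating every legal move with a deepcopy and a full-board check_winner rescan, B makes one pass over all in-bounds 5-cell windows, counting opponent stones and empties per window (a window with 4 opponents + 1 empty, or an existing 5-window plus any empty cell, is exactly a next-move win), so no board copies and no per-move rescans.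
import Mathlib
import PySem

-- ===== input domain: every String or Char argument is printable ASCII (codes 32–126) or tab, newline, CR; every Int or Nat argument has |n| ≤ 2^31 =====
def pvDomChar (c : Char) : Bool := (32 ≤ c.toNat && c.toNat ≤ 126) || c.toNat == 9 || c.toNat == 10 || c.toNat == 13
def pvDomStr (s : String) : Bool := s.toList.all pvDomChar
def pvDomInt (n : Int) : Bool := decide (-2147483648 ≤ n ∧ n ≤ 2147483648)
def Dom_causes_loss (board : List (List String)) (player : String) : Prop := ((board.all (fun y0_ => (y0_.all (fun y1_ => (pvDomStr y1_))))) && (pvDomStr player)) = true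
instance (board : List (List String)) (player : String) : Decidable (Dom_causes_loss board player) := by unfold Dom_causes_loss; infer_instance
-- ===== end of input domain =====

-- B replaces A's per-legal-move board copy + full-board win rescan with a single scan
-- over all in-bounds 5-cell windows (objective: faster, asymptotically fewer cell reads).

def pvCell (board : List (List String)) (i j : Int) : String :=
  PySem.List.pyGetD (PySem.List.pyGetD board i []) j ""

-- ===== PORT A =====
-- ===== PORT A =====
def pv_get_legal_moves (board : List (List String)) : List (Int × Int) :=
  let size : Int := board.length
  (PySem.List.pyRange 0 size 1).foldl (fun acc x =>
    (PySem.List.pyRange 0 size 1).foldl (fun acc2 y =>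
      if pvCell board x y = "." then acc2 ++ [(x, y)] else acc2) acc) []

def pv_make_move (board : List (List String)) (move : Int × Int) (player : String) :
    List (List String) :=
  PySem.List.pySetD board move.1
    (PySem.List.pySetD (PySem.List.pyGetD board move.1 []) move.2 player)

-- the inner 'for step in range(1, 5): … else: break' loop, state = (count, broken)
def pv_stepCount (board : List (List String)) (size x y dx dy : Int) (player : String) : Int :=
  ((PySem.List.pyRange 1 5 1).foldl (fun st step =>
      if st.2 then st
      else if 0 ≤ x + step * dx ∧ x + step * dx < size ∧ 0 ≤ y + step * dy ∧
              y + step * dy < size ∧ pvCell board (x + step * dx) (y + step * dy) = player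
      then (st.1 + 1, false) else (st.1, true)) ((1 : Int), false)).1

def pv_check_winner (board : List (List String)) (player : String) : Bool :=
  let size : Int := board.length
  (PySem.List.pyRange 0 size 1).any fun x =>
    (PySem.List.pyRange 0 size 1).any fun y =>
      decide (pvCell board x y = player) &&
      ([((1:Int),(0:Int)), (0,1), (1,1), (1,-1)].any fun d =>
        decide (5 ≤ pv_stepCount board size x y d.1 d.2 player))

def causes_loss (board : List (List String)) (player : String) : Bool :=
  let opponent := if player = "X" then "O" else "X"
  (pv_get_legal_moves board).any fun m =>
    pv_check_winner (pv_make_move board m opponent) opponent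

-- ===== PORT B =====
-- ===== PORT B =====
def pvWindow (board : List (List String)) (x y dx dy : Int) : List String :=
  (PySem.List.pyRange 0 5 1).map fun k => pvCell board (x + k * dx) (y + k * dy)

def pvInBounds (size x y dx dy : Int) : Bool :=
  decide (0 ≤ x + 4 * dx ∧ x + 4 * dx < size ∧ 0 ≤ y + 4 * dy ∧ y + 4 * dy < size)

def pvDirList : List (Int × Int) := [(1,0), (0,1), (1,1), (1,-1)]

-- has_empty = any(board[x][y] == '.' ...)
def pv_hasEmpty (board : List (List String)) : Bool :=
  let size : Int := board.length
  (PySem.List.pyRange 0 size 1).any fun x =>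
    (PySem.List.pyRange 0 size 1).any fun y => decide (pvCell board x y = ".")

-- four = any(in_bounds(...) and window(...).count(opponent) == 4 and window(...).count('.') == 1 ...)
def pv_four (board : List (List String)) (opponent : String) : Bool :=
  let size : Int := board.length
  (PySem.List.pyRange 0 size 1).any fun x =>
    (PySem.List.pyRange 0 size 1).any fun y =>
      pvDirList.any fun d =>
        pvInBounds size x y d.1 d.2 &&
        decide (PySem.List.count (pvWindow board x y d.1 d.2) opponent = 4) &&
        decide (PySem.List.count (pvWindow board x y d.1 d.2) "." = 1)

-- five = any(in_bounds(...) and window(...).count(opponent) == 5 ...)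
def pv_five (board : List (List String)) (opponent : String) : Bool :=
  let size : Int := board.length
  (PySem.List.pyRange 0 size 1).any fun x =>
    (PySem.List.pyRange 0 size 1).any fun y =>
      pvDirList.any fun d =>
        pvInBounds size x y d.1 d.2 &&
        decide (PySem.List.count (pvWindow board x y d.1 d.2) opponent = 5)

def causes_loss_alt (board : List (List String)) (player : String) : Bool :=
  let opponent := if player = "X" then "O" else "X"
  pv_four board opponent || (pv_five board opponent && pv_hasEmpty board)


-- ===== PRECONDITION & SPEC =====
-- Pre_ excludes exactly the boards on which A raises IndexError: some row shorter than
-- the number of rows (both programs index board[x][y] for all x, y < len(board)).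
def Pre_causes_loss (board : List (List String)) (player : String) : Prop :=
  ∀ row ∈ board, board.length ≤ row.length
instance (board : List (List String)) (player : String) :
    Decidable (Pre_causes_loss board player) := by unfold Pre_causes_loss; infer_instance

def pvWitness_causes_loss : List (List String) × String :=
  ([["O","O","O","O","."],
    [".",".",".",".","."],
    [".",".",".",".","."],
    [".",".",".",".","."],
    [".",".",".",".","."]], "X")

def Spec_causes_loss (board : List (List String)) (player : String) (out : Bool) : Prop :=
  out = causes_loss_alt board player
instance (board : List (List String)) (player : String) (out : Bool) :
    Decidable (Spec_causes_loss board player out) := by unfold Spec_causes_loss; infer_instance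

-- ===== CLAIM (what is proved, stated in full; the proofs are below) =====
def Claim_equal_causes_loss : Prop := ∀ (board : List (List String)) (player : String), Dom_causes_loss board player → Pre_causes_loss board player → Spec_causes_loss board player (causes_loss board player)

-- ===== LEMMAS AND PROOFS =====

-- proof-side vocabulary
def pvDirs : List (Int × Int) := [((1:Int),(0:Int)), (0,1), (1,1), (1,-1)]
def pvL (b : List (List String)) : Int := (b.length : Int)
def pvEmptyAt (b : List (List String)) (i j : Int) : Prop :=
  0 ≤ i ∧ i < pvL b ∧ 0 ≤ j ∧ j < pvL b ∧ pvCell b i j = "."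
def pvGood (b : List (List String)) (p : String) (i j : Int) : Prop :=
  0 ≤ i ∧ i < pvL b ∧ 0 ≤ j ∧ j < pvL b ∧ pvCell b i j = p
def pvW5 (b : List (List String)) (p : String) (x y dx dy : Int) : Prop :=
  ∀ k : Int, 0 ≤ k → k < 5 → pvGood b p (x + k*dx) (y + k*dy)
def pvAnchor (b : List (List String)) (x y dx dy : Int) : Prop :=
  (dx, dy) ∈ pvDirs ∧ 0 ≤ x ∧ x < pvL b ∧ 0 ≤ y ∧ y < pvL b ∧
  0 ≤ x + 4*dx ∧ x + 4*dx < pvL b ∧ 0 ≤ y + 4*dy ∧ y + 4*dy < pvL b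
def pvFive (b : List (List String)) (opp : String) (x y dx dy : Int) : Prop :=
  pvAnchor b x y dx dy ∧ ∀ k : Int, 0 ≤ k → k < 5 → pvCell b (x + k*dx) (y + k*dy) = opp
def pvFour (b : List (List String)) (opp : String) (x y dx dy : Int) : Prop :=
  pvAnchor b x y dx dy ∧ ∃ k0 : Int, 0 ≤ k0 ∧ k0 < 5 ∧ pvCell b (x + k0*dx) (y + k0*dy) = "." ∧
    ∀ k : Int, 0 ≤ k → k < 5 → k ≠ k0 → pvCell b (x + k*dx) (y + k*dy) = opp

-- direction facts
lemma pvDir_cases {d : Int × Int} (hd : d ∈ pvDirs) :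
    d = (1,0) ∨ d = (0,1) ∨ d = (1,1) ∨ d = (1,-1) := by
  simp [pvDirs] at hd
  rcases hd with h | h | h | h <;> simp [Prod.ext_iff] at h <;> simp [Prod.ext_iff, h]

lemma pv_spread {dx dy : Int} (hd : (dx, dy) ∈ pvDirs) {L x y : Int}
    (h0x : 0 ≤ x) (h1x : x < L) (h0y : 0 ≤ y) (h1y : y < L)
    (h4x0 : 0 ≤ x + 4*dx) (h4x1 : x + 4*dx < L) (h4y0 : 0 ≤ y + 4*dy) (h4y1 : y + 4*dy < L)
    {k : Int} (hk0 : 0 ≤ k) (hk5 : k < 5) :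
    0 ≤ x + k*dx ∧ x + k*dx < L ∧ 0 ≤ y + k*dy ∧ y + k*dy < L := by
  rcases pvDir_cases hd with h | h | h | h <;>
    (injection h with h1 h2; subst h1; subst h2) <;> refine ⟨?_, ?_, ?_, ?_⟩ <;> omega

lemma pv_dir_inj {dx dy : Int} (hd : (dx, dy) ∈ pvDirs) {x y k j : Int}
    (hx : x + k*dx = x + j*dx) (hy : y + k*dy = y + j*dy) : k = j := by
  rcases pvDir_cases hd with h | h | h | h <;>
    (injection h with h1 h2; subst h1; subst h2) <;> omega

-- step-count loop characterisation
set_option maxHeartbeats 1000000 in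
lemma pv_stepCount_ge5_iff (b : List (List String)) (size x y dx dy : Int) (p : String) :
    5 ≤ pv_stepCount b size x y dx dy p ↔
      ((0 ≤ x + 1*dx ∧ x + 1*dx < size ∧ 0 ≤ y + 1*dy ∧ y + 1*dy < size ∧ pvCell b (x + 1*dx) (y + 1*dy) = p) ∧
       (0 ≤ x + 2*dx ∧ x + 2*dx < size ∧ 0 ≤ y + 2*dy ∧ y + 2*dy < size ∧ pvCell b (x + 2*dx) (y + 2*dy) = p) ∧
       (0 ≤ x + 3*dx ∧ x + 3*dx < size ∧ 0 ≤ y + 3*dy ∧ y + 3*dy < size ∧ pvCell b (x + 3*dx) (y + 3*dy) = p) ∧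
       (0 ≤ x + 4*dx ∧ x + 4*dx < size ∧ 0 ≤ y + 4*dy ∧ y + 4*dy < size ∧ pvCell b (x + 4*dx) (y + 4*dy) = p)) := by
  have h : PySem.List.pyRange 1 5 1 = [1, 2, 3, 4] := by decide
  unfold pv_stepCount
  rw [h]
  simp only [List.foldl]
  by_cases c1 : 0 ≤ x + dx ∧ x + dx < size ∧ 0 ≤ y + dy ∧ y + dy < size ∧ pvCell b (x + dx) (y + dy) = p <;>
  by_cases c2 : 0 ≤ x + 2*dx ∧ x + 2*dx < size ∧ 0 ≤ y + 2*dy ∧ y + 2*dy < size ∧ pvCell b (x + 2*dx) (y + 2*dy) = p <;>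
  by_cases c3 : 0 ≤ x + 3*dx ∧ x + 3*dx < size ∧ 0 ≤ y + 3*dy ∧ y + 3*dy < size ∧ pvCell b (x + 3*dx) (y + 3*dy) = p <;>
  by_cases c4 : 0 ≤ x + 4*dx ∧ x + 4*dx < size ∧ 0 ≤ y + 4*dy ∧ y + 4*dy < size ∧ pvCell b (x + 4*dx) (y + 4*dy) = p <;>
    simp [c1, c2, c3, c4]

-- check_winner characterisation
lemma pv_check_winner_iff (b : List (List String)) (p : String) :
    pv_check_winner b p = true ↔ ∃ x y dx dy, (dx, dy) ∈ pvDirs ∧ pvW5 b p x y dx dy := by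
  simp only [pv_check_winner, List.any_eq_true, PySem.List.mem_pyRange_one,
    Bool.and_eq_true, decide_eq_true_eq, pv_stepCount_ge5_iff]
  constructor
  · rintro ⟨x, ⟨hx0, hx1⟩, y, ⟨hy0, hy1⟩, hc, d, hd, h1, h2, h3, h4⟩
    refine ⟨x, y, d.1, d.2, by simpa [pvDirs] using hd, ?_⟩
    intro k hk0 hk5
    interval_cases k
    · exact ⟨by omega, by simpa [pvL] using hx1, by omega, by simpa [pvL] using hy1,
        by simpa using hc⟩
    · exact ⟨h1.1, h1.2.1, h1.2.2.1, h1.2.2.2.1, h1.2.2.2.2⟩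
    · exact ⟨h2.1, h2.2.1, h2.2.2.1, h2.2.2.2.1, h2.2.2.2.2⟩
    · exact ⟨h3.1, h3.2.1, h3.2.2.1, h3.2.2.2.1, h3.2.2.2.2⟩
    · exact ⟨h4.1, h4.2.1, h4.2.2.1, h4.2.2.2.1, h4.2.2.2.2⟩
  · rintro ⟨x, y, dx, dy, hd, hW⟩
    have h0 := hW 0 (by omega) (by omega)
    have h1 := hW 1 (by omega) (by omega)
    have h2 := hW 2 (by omega) (by omega)
    have h3 := hW 3 (by omega) (by omega)
    have h4 := hW 4 (by omega) (by omega)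
    simp only [pvGood, pvL] at h0 h1 h2 h3 h4
    refine ⟨x, ⟨by simpa using h0.1, by simpa using h0.2.1⟩,
            y, ⟨by simpa using h0.2.2.1, by simpa using h0.2.2.2.1⟩,
            by simpa using h0.2.2.2.2, (dx, dy), by simpa [pvDirs] using hd,
            h1, h2, h3, h4⟩

-- legal-moves characterisation
lemma pv_mem_legal (b : List (List String)) (m : Int × Int) :
    m ∈ pv_get_legal_moves b ↔ pvEmptyAt b m.1 m.2 := by
  have hinner : ∀ (x : Int) (acc : List (Int × Int)),
      List.foldl (fun acc2 y => if pvCell b x y = "." then acc2 ++ [(x, y)] else acc2) acc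
        (PySem.List.pyRange 0 (b.length : Int) 1)
      = acc ++ (((PySem.List.pyRange 0 (b.length : Int) 1).filter
          (fun y => decide (pvCell b x y = "."))).map (fun y => (x, y))) := by
    intro x acc
    exact PySem.List.foldl_append_ite (fun y => pvCell b x y = ".") (fun y => (x, y)) _ _
  unfold pv_get_legal_moves
  simp only [hinner, PySem.List.foldl_append_eq_flatMap, List.nil_append]
  simp only [List.mem_flatMap, List.mem_map, List.mem_filter,
    PySem.List.mem_pyRange_one, decide_eq_true_eq, pvEmptyAt, pvL]
  constructor
  · rintro ⟨x, hx, y, ⟨hy, hc⟩, rfl⟩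
    exact ⟨hx.1, hx.2, hy.1, hy.2, hc⟩
  · rintro ⟨h1, h2, h3, h4, h5⟩
    exact ⟨m.1, ⟨h1, h2⟩, m.2, ⟨⟨h3, h4⟩, h5⟩, rfl⟩

-- make_move facts
lemma pv_make_move_length (b : List (List String)) (m : Int × Int) (v : String) :
    (pv_make_move b m v).length = b.length := by
  simp [pv_make_move, PySem.List.length_pySetD]

lemma pvGetD_set {A : Type} (l : List A) (n m : Nat) (a d : A) (hn : n < l.length) :
    (l.set n a).getD m d = if m = n then a else l.getD m d := by
  by_cases h : m = n
  · subst h; simp [List.getD_eq_getElem?_getD, hn]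
  · have h' : n ≠ m := fun hh => h hh.symm
    simp [List.getD_eq_getElem?_getD, h, h']

lemma pvPyGetD_toNat {A : Type} (l : List A) (i : Int) (d : A) (h : 0 ≤ i) :
    PySem.List.pyGetD l i d = l.getD i.toNat d := by
  rcases lt_or_ge i l.length with hlt | hge
  · rw [PySem.List.pyGetD_eq_getElem l d h hlt, List.getD_eq_getElem?_getD,
      List.getElem?_eq_getElem (by omega)]
    rfl
  · rw [PySem.List.pyGetD_of_none _ _ _ ((PySem.List.pyGet?_eq_none_iff _ _).2 ?_),
      List.getD_eq_getElem?_getD, List.getElem?_eq_none (by omega)]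
    · rfl
    · simp [PySem.Raise.InRange]
      omega

lemma pvCell_getD (b : List (List String)) (i j : Int) (hi : 0 ≤ i) (hj : 0 ≤ j) :
    pvCell b i j = (b.getD i.toNat []).getD j.toNat "" := by
  unfold pvCell
  rw [pvPyGetD_toNat b i [] hi, pvPyGetD_toNat _ j "" hj]

lemma pvCell_make_move (b : List (List String)) (hpre : ∀ row ∈ b, b.length ≤ row.length)
    {mx my : Int} (hm : pvEmptyAt b mx my) (v : String) {i j : Int}
    (hi0 : 0 ≤ i) (hi1 : i < pvL b) (hj0 : 0 ≤ j) (_hj1 : j < pvL b) :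
    pvCell (pv_make_move b (mx, my) v) i j =
      if i = mx ∧ j = my then v else pvCell b i j := by
  obtain ⟨hmx0, hmx1, hmy0, hmy1, _⟩ := hm
  simp only [pvL] at hmx1 hmy1 hi1
  have hbx : mx.toNat < b.length := by omega
  have hbi : i.toNat < b.length := by omega
  have hrl : ∀ n : Nat, n < b.length → b.length ≤ (b.getD n []).length := by
    intro n hn
    have hmem : b.getD n [] ∈ b := by
      rw [List.getD_eq_getElem?_getD, List.getElem?_eq_getElem hn]
      exact List.getElem_mem _
    exact hpre _ hmem
  have hset : pv_make_move b (mx, my) v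
      = b.set mx.toNat ((b.getD mx.toNat []).set my.toNat v) := by
    show PySem.List.pySetD b mx (PySem.List.pySetD (PySem.List.pyGetD b mx []) my v) = _
    rw [pvPyGetD_toNat b mx [] hmx0, PySem.List.pySetD_of_nonneg _ _ hmy0,
        PySem.List.pySetD_of_nonneg _ _ hmx0]
  rw [hset, pvCell_getD _ i j hi0 hj0, pvCell_getD b i j hi0 hj0,
      pvGetD_set b mx.toNat i.toNat _ [] hbx]
  by_cases hiq : i.toNat = mx.toNat
  · rw [if_pos hiq]
    have hieq : i = mx := by omega
    rw [pvGetD_set _ my.toNat j.toNat v "" (by have := hrl mx.toNat hbx; omega)]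
    by_cases hjq : j.toNat = my.toNat
    · have hjeq : j = my := by omega
      rw [if_pos hjq, if_pos ⟨hieq, hjeq⟩]
    · have hne : ¬(i = mx ∧ j = my) := fun hand => hjq (by omega)
      rw [if_neg hjq, if_neg hne]
      rw [show i.toNat = mx.toNat from hiq]
  · have hne : ¬(i = mx ∧ j = my) := fun hand => hiq (by omega)
    rw [if_neg hiq, if_neg hne]

lemma pvWindow_eq (b : List (List String)) (x y dx dy : Int) :
    pvWindow b x y dx dy =
      [pvCell b (x + 0*dx) (y + 0*dy), pvCell b (x + 1*dx) (y + 1*dy),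
       pvCell b (x + 2*dx) (y + 2*dy), pvCell b (x + 3*dx) (y + 3*dy),
       pvCell b (x + 4*dx) (y + 4*dy)] := by
  have h : PySem.List.pyRange 0 5 1 = [0, 1, 2, 3, 4] := by decide
  simp [pvWindow, h]

lemma pvCount_five (a0 a1 a2 a3 a4 v : String) :
    PySem.List.count [a0, a1, a2, a3, a4] v = 5 ↔
      (a0 = v ∧ a1 = v ∧ a2 = v ∧ a3 = v ∧ a4 = v) := by
  by_cases h0 : a0 = v <;> by_cases h1 : a1 = v <;> by_cases h2 : a2 = v <;>
    by_cases h3 : a3 = v <;> by_cases h4 : a4 = v <;>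
      simp_all [PySem.List.count] 

lemma pvCount_four (a0 a1 a2 a3 a4 v : String) (hv : v ≠ ".") :
    (PySem.List.count [a0, a1, a2, a3, a4] v = 4 ∧
     PySem.List.count [a0, a1, a2, a3, a4] "." = 1) ↔
      ((a0 = "." ∧ a1 = v ∧ a2 = v ∧ a3 = v ∧ a4 = v) ∨
       (a0 = v ∧ a1 = "." ∧ a2 = v ∧ a3 = v ∧ a4 = v) ∨
       (a0 = v ∧ a1 = v ∧ a2 = "." ∧ a3 = v ∧ a4 = v) ∨
       (a0 = v ∧ a1 = v ∧ a2 = v ∧ a3 = "." ∧ a4 = v) ∨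
       (a0 = v ∧ a1 = v ∧ a2 = v ∧ a3 = v ∧ a4 = ".")) := by
  by_cases h0 : a0 = v <;> by_cases h1 : a1 = v <;> by_cases h2 : a2 = v <;>
    by_cases h3 : a3 = v <;> by_cases h4 : a4 = v <;>
      simp_all [PySem.List.count, List.count_cons]

lemma pv_hasEmpty_iff (b : List (List String)) :
    pv_hasEmpty b = true ↔ ∃ i j, pvEmptyAt b i j := by
  simp only [pv_hasEmpty, List.any_eq_true, PySem.List.mem_pyRange_one, decide_eq_true_eq]
  constructor
  · rintro ⟨x, ⟨hx0, hx1⟩, y, ⟨hy0, hy1⟩, hc⟩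
    exact ⟨x, y, hx0, hx1, hy0, hy1, hc⟩
  · rintro ⟨i, j, h1, h2, h3, h4, h5⟩
    exact ⟨i, ⟨h1, h2⟩, j, ⟨h3, h4⟩, h5⟩

lemma pv_five_iff (b : List (List String)) (opp : String) :
    pv_five b opp = true ↔ ∃ x y dx dy, pvFive b opp x y dx dy := by
  simp only [pv_five, List.any_eq_true, PySem.List.mem_pyRange_one, Bool.and_eq_true,
    decide_eq_true_eq, pvInBounds, pvWindow_eq, pvCount_five]
  constructor
  · rintro ⟨x, ⟨hx0, hx1⟩, y, ⟨hy0, hy1⟩, d, hd, ⟨hb1, hb2, hb3, hb4⟩, hc0, hc1, hc2, hc3, hc4⟩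
    refine ⟨x, y, d.1, d.2, ⟨by simpa [pvDirs, pvDirList] using hd,
      hx0, hx1, hy0, hy1, hb1, hb2, hb3, hb4⟩, ?_⟩
    intro k hk0 hk5
    have hk : k = 0 ∨ k = 1 ∨ k = 2 ∨ k = 3 ∨ k = 4 := by omega
    rcases hk with rfl | rfl | rfl | rfl | rfl <;> assumption
  · rintro ⟨x, y, dx, dy, ⟨hd, hx0, hx1, hy0, hy1, hb1, hb2, hb3, hb4⟩, hall⟩
    refine ⟨x, ⟨hx0, hx1⟩, y, ⟨hy0, hy1⟩, (dx, dy),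
      by simpa [pvDirs, pvDirList] using hd, ⟨hb1, hb2, hb3, hb4⟩,
      hall 0 (by omega) (by omega), hall 1 (by omega) (by omega),
      hall 2 (by omega) (by omega), hall 3 (by omega) (by omega),
      hall 4 (by omega) (by omega)⟩

lemma pv_four_iff (b : List (List String)) (opp : String) (hv : opp ≠ ".") :
    pv_four b opp = true ↔ ∃ x y dx dy, pvFour b opp x y dx dy := by
  simp only [pv_four, List.any_eq_true, PySem.List.mem_pyRange_one, Bool.and_eq_true,
    decide_eq_true_eq, pvInBounds, pvWindow_eq]
  constructor
  · rintro ⟨x, ⟨hx0, hx1⟩, y, ⟨hy0, hy1⟩, d, hd, ⟨⟨hb1, hb2, hb3, hb4⟩, hc4⟩, hc1⟩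
    have hpat := (pvCount_four _ _ _ _ _ _ hv).1 ⟨hc4, hc1⟩
    refine ⟨x, y, d.1, d.2, ⟨by simpa [pvDirs, pvDirList] using hd,
      hx0, hx1, hy0, hy1, hb1, hb2, hb3, hb4⟩, ?_⟩
    rcases hpat with ⟨e, h1, h2, h3, h4⟩ | ⟨h1, e, h2, h3, h4⟩ | ⟨h1, h2, e, h3, h4⟩ |
      ⟨h1, h2, h3, e, h4⟩ | ⟨h1, h2, h3, h4, e⟩
    · exact ⟨0, by omega, by omega, e, fun k hk0 hk5 hne => by
        rcases (by omega : k = 0 ∨ k = 1 ∨ k = 2 ∨ k = 3 ∨ k = 4) with rfl | rfl | rfl | rfl | rfl <;>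
          simp_all⟩
    · exact ⟨1, by omega, by omega, e, fun k hk0 hk5 hne => by
        rcases (by omega : k = 0 ∨ k = 1 ∨ k = 2 ∨ k = 3 ∨ k = 4) with rfl | rfl | rfl | rfl | rfl <;>
          simp_all⟩
    · exact ⟨2, by omega, by omega, e, fun k hk0 hk5 hne => by
        rcases (by omega : k = 0 ∨ k = 1 ∨ k = 2 ∨ k = 3 ∨ k = 4) with rfl | rfl | rfl | rfl | rfl <;>
          simp_all⟩
    · exact ⟨3, by omega, by omega, e, fun k hk0 hk5 hne => by
        rcases (by omega : k = 0 ∨ k = 1 ∨ k = 2 ∨ k = 3 ∨ k = 4) with rfl | rfl | rfl | rfl | rfl <;>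
          simp_all⟩
    · exact ⟨4, by omega, by omega, e, fun k hk0 hk5 hne => by
        rcases (by omega : k = 0 ∨ k = 1 ∨ k = 2 ∨ k = 3 ∨ k = 4) with rfl | rfl | rfl | rfl | rfl <;>
          simp_all⟩
  · rintro ⟨x, y, dx, dy, ⟨hd, hx0, hx1, hy0, hy1, hb1, hb2, hb3, hb4⟩, k0, hk00, hk05, he, hrest⟩
    have hdisj :
        (pvCell b (x + 0*dx) (y + 0*dy) = "." ∧ pvCell b (x + 1*dx) (y + 1*dy) = opp ∧
          pvCell b (x + 2*dx) (y + 2*dy) = opp ∧ pvCell b (x + 3*dx) (y + 3*dy) = opp ∧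
          pvCell b (x + 4*dx) (y + 4*dy) = opp) ∨
        (pvCell b (x + 0*dx) (y + 0*dy) = opp ∧ pvCell b (x + 1*dx) (y + 1*dy) = "." ∧
          pvCell b (x + 2*dx) (y + 2*dy) = opp ∧ pvCell b (x + 3*dx) (y + 3*dy) = opp ∧
          pvCell b (x + 4*dx) (y + 4*dy) = opp) ∨
        (pvCell b (x + 0*dx) (y + 0*dy) = opp ∧ pvCell b (x + 1*dx) (y + 1*dy) = opp ∧
          pvCell b (x + 2*dx) (y + 2*dy) = "." ∧ pvCell b (x + 3*dx) (y + 3*dy) = opp ∧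
          pvCell b (x + 4*dx) (y + 4*dy) = opp) ∨
        (pvCell b (x + 0*dx) (y + 0*dy) = opp ∧ pvCell b (x + 1*dx) (y + 1*dy) = opp ∧
          pvCell b (x + 2*dx) (y + 2*dy) = opp ∧ pvCell b (x + 3*dx) (y + 3*dy) = "." ∧
          pvCell b (x + 4*dx) (y + 4*dy) = opp) ∨
        (pvCell b (x + 0*dx) (y + 0*dy) = opp ∧ pvCell b (x + 1*dx) (y + 1*dy) = opp ∧
          pvCell b (x + 2*dx) (y + 2*dy) = opp ∧ pvCell b (x + 3*dx) (y + 3*dy) = opp ∧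
          pvCell b (x + 4*dx) (y + 4*dy) = ".") := by
      rcases (by omega : k0 = 0 ∨ k0 = 1 ∨ k0 = 2 ∨ k0 = 3 ∨ k0 = 4) with rfl | rfl | rfl | rfl | rfl
      · exact Or.inl ⟨he, hrest 1 (by omega) (by omega) (by omega),
          hrest 2 (by omega) (by omega) (by omega), hrest 3 (by omega) (by omega) (by omega),
          hrest 4 (by omega) (by omega) (by omega)⟩
      · exact Or.inr (Or.inl ⟨hrest 0 (by omega) (by omega) (by omega), he,
          hrest 2 (by omega) (by omega) (by omega), hrest 3 (by omega) (by omega) (by omega),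
          hrest 4 (by omega) (by omega) (by omega)⟩)
      · exact Or.inr (Or.inr (Or.inl ⟨hrest 0 (by omega) (by omega) (by omega),
          hrest 1 (by omega) (by omega) (by omega), he,
          hrest 3 (by omega) (by omega) (by omega), hrest 4 (by omega) (by omega) (by omega)⟩))
      · exact Or.inr (Or.inr (Or.inr (Or.inl ⟨hrest 0 (by omega) (by omega) (by omega),
          hrest 1 (by omega) (by omega) (by omega), hrest 2 (by omega) (by omega) (by omega),
          he, hrest 4 (by omega) (by omega) (by omega)⟩)))
      · exact Or.inr (Or.inr (Or.inr (Or.inr ⟨hrest 0 (by omega) (by omega) (by omega),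
          hrest 1 (by omega) (by omega) (by omega), hrest 2 (by omega) (by omega) (by omega),
          hrest 3 (by omega) (by omega) (by omega), he⟩)))
    have hc := (pvCount_four _ _ _ _ _ _ hv).2 hdisj
    exact ⟨x, ⟨hx0, hx1⟩, y, ⟨hy0, hy1⟩, (dx, dy),
      by simpa [pvDirs, pvDirList] using hd, ⟨⟨hb1, hb2, hb3, hb4⟩, hc.1⟩, hc.2⟩

def pvOpp (p : String) : String := if p = "X" then "O" else "X"

lemma pv_causes_iff (b : List (List String)) (p : String) :
    causes_loss b p = true ↔ ∃ m : Int × Int, pvEmptyAt b m.1 m.2 ∧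
      ∃ x y dx dy, (dx, dy) ∈ pvDirs ∧
        pvW5 (pv_make_move b m (pvOpp p)) (pvOpp p) x y dx dy := by
  unfold causes_loss pvOpp
  simp only [List.any_eq_true]
  constructor
  · rintro ⟨m, hm, hw⟩
    exact ⟨m, (pv_mem_legal b m).1 hm, (pv_check_winner_iff _ _).1 hw⟩
  · rintro ⟨m, hm, hw⟩
    exact ⟨m, (pv_mem_legal b m).2 hm, (pv_check_winner_iff _ _).2 hw⟩

lemma pv_W5_make_iff (b : List (List String)) (hpre : ∀ row ∈ b, b.length ≤ row.length)
    {mx my : Int} (hm : pvEmptyAt b mx my) (opp : String) (x y dx dy : Int) :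
    pvW5 (pv_make_move b (mx, my) opp) opp x y dx dy ↔
      ∀ k : Int, 0 ≤ k → k < 5 →
        (0 ≤ x + k*dx ∧ x + k*dx < pvL b ∧ 0 ≤ y + k*dy ∧ y + k*dy < pvL b ∧
         ((x + k*dx = mx ∧ y + k*dy = my) ∨ pvCell b (x + k*dx) (y + k*dy) = opp)) := by
  have hlen : pvL (pv_make_move b (mx, my) opp) = pvL b := by
    simp [pvL, pv_make_move_length]
  unfold pvW5 pvGood
  constructor
  · intro h k hk0 hk5
    obtain ⟨h1, h2, h3, h4, h5⟩ := h k hk0 hk5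
    rw [hlen] at h2 h4
    rw [pvCell_make_move b hpre hm opp h1 h2 h3 h4] at h5
    refine ⟨h1, h2, h3, h4, ?_⟩
    by_cases hc : x + k*dx = mx ∧ y + k*dy = my
    · exact Or.inl hc
    · rw [if_neg hc] at h5
      exact Or.inr h5
  · intro h k hk0 hk5
    obtain ⟨h1, h2, h3, h4, h5⟩ := h k hk0 hk5
    refine ⟨h1, by rw [hlen]; exact h2, h3, by rw [hlen]; exact h4, ?_⟩
    rw [pvCell_make_move b hpre hm opp h1 h2 h3 h4]
    rcases h5 with hc | hc
    · rw [if_pos hc]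
    · by_cases hc2 : x + k*dx = mx ∧ y + k*dy = my
      · rw [if_pos hc2]
      · rw [if_neg hc2]
        exact hc

lemma pv_main (b : List (List String)) (p : String)
    (hpre : ∀ row ∈ b, b.length ≤ row.length) :
    causes_loss b p = causes_loss_alt b p := by
  have hv : pvOpp p ≠ "." := by unfold pvOpp; split_ifs <;> decide
  rw [Bool.eq_iff_iff, pv_causes_iff,
    show causes_loss_alt b p
      = (pv_four b (pvOpp p) || (pv_five b (pvOpp p) && pv_hasEmpty b)) from rfl,
    Bool.or_eq_true, Bool.and_eq_true, pv_four_iff _ _ hv, pv_five_iff, pv_hasEmpty_iff]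
  constructor
  · rintro ⟨m, hm, x, y, dx, dy, hd, hW⟩
    have hW' := (pv_W5_make_iff b hpre hm (pvOpp p) x y dx dy).1 hW
    have h0 := hW' 0 (by omega) (by omega)
    have h4 := hW' 4 (by omega) (by omega)
    have hanchor : pvAnchor b x y dx dy := by
      refine ⟨hd, ?_, ?_, ?_, ?_, h4.1, h4.2.1, h4.2.2.1, h4.2.2.2.1⟩
      · have := h0.1; omega
      · have := h0.2.1; omega
      · have := h0.2.2.1; omega
      · have := h0.2.2.2.1; omega
    by_cases hall : ∀ k : Int, 0 ≤ k → k < 5 → pvCell b (x + k*dx) (y + k*dy) = pvOpp p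
    · exact Or.inr ⟨⟨x, y, dx, dy, hanchor, hall⟩, ⟨m.1, m.2, hm⟩⟩
    · push Not at hall
      obtain ⟨k0, hk00, hk05, hne⟩ := hall
      have hk0' := hW' k0 hk00 hk05
      have heq : x + k0*dx = m.1 ∧ y + k0*dy = m.2 := by
        rcases hk0'.2.2.2.2 with hc | hc
        · exact hc
        · exact absurd hc hne
      refine Or.inl ⟨x, y, dx, dy, hanchor, k0, hk00, hk05, ?_, ?_⟩
      · rw [heq.1, heq.2]
        exact hm.2.2.2.2
      · intro k hk0 hk5 hkne
        rcases (hW' k hk0 hk5).2.2.2.2 with hc | hc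
        · exfalso
          apply hkne
          have hx : x + k*dx = x + k0*dx := by rw [hc.1, heq.1]
          have hy : y + k*dy = y + k0*dy := by rw [hc.2, heq.2]
          exact pv_dir_inj hd hx hy
        · exact hc
  · rintro (⟨x, y, dx, dy, ⟨hd, hx0, hx1, hy0, hy1, hb1, hb2, hb3, hb4⟩,
        k0, hk00, hk05, he, hrest⟩ |
      ⟨⟨x, y, dx, dy, ⟨hd, hx0, hx1, hy0, hy1, hb1, hb2, hb3, hb4⟩, hall⟩, i, j, hemp⟩)
    · have hbnd := pv_spread hd hx0 hx1 hy0 hy1 hb1 hb2 hb3 hb4 hk00 hk05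
      have hm : pvEmptyAt b (x + k0*dx) (y + k0*dy) :=
        ⟨hbnd.1, hbnd.2.1, hbnd.2.2.1, hbnd.2.2.2, he⟩
      refine ⟨(x + k0*dx, y + k0*dy), hm, x, y, dx, dy, hd,
        (pv_W5_make_iff b hpre hm (pvOpp p) x y dx dy).2 ?_⟩
      intro k hk0 hk5
      have hb := pv_spread hd hx0 hx1 hy0 hy1 hb1 hb2 hb3 hb4 hk0 hk5
      refine ⟨hb.1, hb.2.1, hb.2.2.1, hb.2.2.2, ?_⟩
      by_cases hk : k = k0
      · subst hk
        exact Or.inl ⟨rfl, rfl⟩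
      · exact Or.inr (hrest k hk0 hk5 hk)
    · refine ⟨(i, j), hemp, x, y, dx, dy, hd,
        (pv_W5_make_iff b hpre hemp (pvOpp p) x y dx dy).2 ?_⟩
      intro k hk0 hk5
      have hb := pv_spread hd hx0 hx1 hy0 hy1 hb1 hb2 hb3 hb4 hk0 hk5
      exact ⟨hb.1, hb.2.1, hb.2.2.1, hb.2.2.2, Or.inr (hall k hk0 hk5)⟩


-- ===== VERDICT (by name: the statement is the Claim_ definition above) =====
theorem causes_loss_spec : Claim_equal_causes_loss := by
  intro board player _ hpre
  show causes_loss board player = causes_loss_alt board player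
  exact pv_main board player hpre
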